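-- pv_equiv track=rewrite | github.com/981377660LMT/algorithm-study | 22_专题/子数组经典模型/枚举子串固定左端点dp/6049. 含最多 K 个可整除元素的子数组.py | countDistinct2
-- ===== SOURCE A (Python) =====
-- from typing import List, Optional, Tuple
--
-- def countDistinct2(nums: List[int], k: int, p: int) -> int:
--     """按照起点枚举子数组
--
--     对于每个满足题意的子数组，我们将它加入字典树。由于每产生一个不同的子数组，
--     必然将会在字典树中插入一个节点，故最终答案 = 字典树中新插入的节点数量。
--     O(n^2)
--     """
--     trie = dict()
--     res = 0
--     for start in range(len(nums)):
--         root, count = trie, 0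
--         for end in range(start, len(nums)):
--             if nums[end] % p == 0:
--                 count += 1
--
--             if count <= k:
--                 if nums[end] not in root:
--                     root[nums[end]] = {}
--                     res += 1
--                 root = root[nums[end]]
--             else:
--                 break
--
--     return res
-- ===== SOURCE B (Python) =====
-- def countDistinct2(nums, k, p):
--     """Count distinct subarrays containing at most k elements divisible by p.
--
--     Validity of a subarray depends only on its contents, so the answer is
--     simply the size of the set of valid subarrays.  A prefix-sum table of
--     divisible-element counts classifies each (start, end) pair directly.
--     """
--     n = len(nums)
--     pre = [0]
--     for v in nums:
--         pre.append(pre[-1] + (v % p == 0))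
--     seen = set()
--     for s in range(n):
--         for e in range(s + 1, n + 1):
--             if pre[e] - pre[s] <= k:
--                 seen.add(tuple(nums[s:e]))
--     return len(seen)
-- ===== Notes on version B (the rewrite author's own statement) =====
-- stated objective: alternative
-- what changed: B replaces A's incremental trie (counting node insertions while walking per-start extensions with an early break) by a direct characterisation: a prefix-sum table of divisible-element counts classifies every (start,end) pair, and the answer is the size of a hash set of the valid subarrays.
import Mathlib
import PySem

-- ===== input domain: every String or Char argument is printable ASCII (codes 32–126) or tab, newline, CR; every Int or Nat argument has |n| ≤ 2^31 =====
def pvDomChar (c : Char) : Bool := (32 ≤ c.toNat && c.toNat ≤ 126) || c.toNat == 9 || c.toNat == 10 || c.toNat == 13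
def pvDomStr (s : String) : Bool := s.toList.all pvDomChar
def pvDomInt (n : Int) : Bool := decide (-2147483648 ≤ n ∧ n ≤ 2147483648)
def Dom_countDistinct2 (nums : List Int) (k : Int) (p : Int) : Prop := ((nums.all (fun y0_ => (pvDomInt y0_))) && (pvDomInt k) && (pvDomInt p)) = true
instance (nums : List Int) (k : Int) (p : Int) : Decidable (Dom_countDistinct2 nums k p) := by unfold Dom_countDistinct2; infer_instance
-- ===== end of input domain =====

-- B replaces A's incremental trie walk by a prefix-sum classification of the (start,end) pairs
-- plus a set of the valid subarrays; equal return value wherever A returns (objective: alternative).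


-- ===== PORT A =====
-- A's nested-dict trie cannot be a Lean nested inductive, so it is represented exactly by the
-- set of its node paths (a trie node ↔ its key sequence from the root): 'nums[end] not in root'
-- is '(current path ++ [nums[end]]) ∉ trie' (every ancestor of the current node was already
-- walked/created, so the child key exists iff the extended path was inserted before), and
-- 'root[nums[end]] = {}; res += 1' is the insertion of that path.  The inner loop
-- 'for end in range(start, n)' reading nums[end] iterates the elements of nums[start:],
-- here 'nums.drop start'.
def pvInnerA (k p : Int) : List Int → List Int → Int → PySem.Set (List Int) → Int →
    PySem.Set (List Int) × Int
  | [], _path, _count, trie, res => (trie, res)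
  | x :: rest, path, count, trie, res =>
    let count' := if PySem.Int.mod x p == 0 then count + 1 else count
    if count' ≤ k then
      if (path ++ [x]) ∈ trie then
        pvInnerA k p rest (path ++ [x]) count' trie res
      else
        pvInnerA k p rest (path ++ [x]) count' (PySem.Set.add trie (path ++ [x])) (res + 1)
    else (trie, res)

def countDistinct2 (nums : List Int) (k : Int) (p : Int) : Int :=
  ((List.range nums.length).foldl
      (fun st start => pvInnerA k p (nums.drop start) [] 0 st.1 st.2)
      ((PySem.Set.empty : PySem.Set (List Int)), 0)).2

-- ===== PORT B =====
def countDistinct2_alt (nums : List Int) (k : Int) (p : Int) : Int :=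
  let n := nums.length
  let pre := nums.foldl
      (fun pre v => pre ++ [PySem.List.pyGetD pre (-1) 0 + (if PySem.Int.mod v p == 0 then 1 else 0)])
      [(0 : Int)]
  let seen := (List.range n).foldl
      (fun seen (s : Nat) =>
        (PySem.List.pyRange ((s : Int) + 1) ((n : Int) + 1) 1).foldl
          (fun seen e =>
            if PySem.List.pyGetD pre e 0 - PySem.List.pyGetD pre (s : Int) 0 ≤ k then
              PySem.Set.add seen (PySem.List.slice nums (some (s : Int)) (some e))
            else seen)
          seen)
      ((PySem.Set.empty : PySem.Set (List Int)))
  (seen.length : Int)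

-- ===== PRECONDITION & SPEC =====
-- Pre_ excludes exactly the inputs where A raises ZeroDivisionError ('% p' with p = 0 on a
-- nonempty nums); B raises there too.
def Pre_countDistinct2 (nums : List Int) (k : Int) (p : Int) : Prop := nums = [] ∨ p ≠ 0
instance (nums : List Int) (k : Int) (p : Int) : Decidable (Pre_countDistinct2 nums k p) := by
  unfold Pre_countDistinct2; infer_instance
def pvWitness_countDistinct2 : List Int × Int × Int := ([2, 3, 4, 2], 1, 2)
def Spec_countDistinct2 (nums : List Int) (k : Int) (p : Int) (out : Int) : Prop := out = countDistinct2_alt nums k p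
instance (nums : List Int) (k : Int) (p : Int) (out : Int) : Decidable (Spec_countDistinct2 nums k p out) := by unfold Spec_countDistinct2; infer_instance

-- ===== CLAIM (what is proved, stated in full; the proofs are below) =====
def Claim_equal_countDistinct2 : Prop := ∀ (nums : List Int) (k : Int) (p : Int), Dom_countDistinct2 nums k p → Pre_countDistinct2 nums k p → Spec_countDistinct2 nums k p (countDistinct2 nums k p)

-- ===== LEMMAS AND PROOFS =====

def pvCnt (p : Int) (l : List Int) : Int := (l.countP (fun x => PySem.Int.mod x p == 0) : Int)
lemma pvCnt_nonneg (p : Int) (l : List Int) : 0 ≤ pvCnt p l := by simp [pvCnt]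
lemma pvCnt_cons (p x : Int) (l : List Int) :
    pvCnt p (x :: l) = (if PySem.Int.mod x p == 0 then 1 else 0) + pvCnt p l := by
  simp [pvCnt, List.countP_cons]; split <;> ring

lemma pvInnerA_mem (k p : Int) (l : List Int) : ∀ (path : List Int) (c : Int)
    (trie : PySem.Set (List Int)) (res : Int) (y : List Int),
    y ∈ (pvInnerA k p l path c trie res).1 ↔
      y ∈ trie ∨ ∃ j : Nat, 1 ≤ j ∧ j ≤ l.length ∧ c + pvCnt p (l.take j) ≤ k ∧
        y = path ++ l.take j := by
  induction l with
  | nil =>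
    intro path c trie res y
    simp only [pvInnerA, List.length_nil]
    constructor
    · exact Or.inl
    · rintro (h | ⟨j, h1, h2, -⟩)
      · exact h
      · omega
  | cons x rest ih =>
    intro path c trie res y
    simp only [pvInnerA]
    have hsum : ∀ j : Nat, pvCnt p ((x :: rest).take (j+1))
        = (if PySem.Int.mod x p == 0 then (1:Int) else 0) + pvCnt p (rest.take j) := by
      intro j; rw [List.take_succ_cons, pvCnt_cons]
    set d : Int := if PySem.Int.mod x p == 0 then (1:Int) else 0 with hd
    have hc' : (if PySem.Int.mod x p == 0 then c + 1 else c) = c + d := by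
      rw [hd]; split <;> ring
    rw [hc']
    by_cases hck : c + d ≤ k
    · rw [if_pos hck]
      have key : ∀ (t : PySem.Set (List Int)) (r : Int),
          (∀ z, z ∈ t ↔ z ∈ trie ∨ z = path ++ [x]) →
          (y ∈ (pvInnerA k p rest (path ++ [x]) (c + d) t r).1 ↔
            y ∈ trie ∨ ∃ j : Nat, 1 ≤ j ∧ j ≤ (x :: rest).length ∧
              c + pvCnt p ((x :: rest).take j) ≤ k ∧ y = path ++ (x :: rest).take j) := by
        intro t r ht
        rw [ih, ht]
        constructor
        · rintro ((h | h) | ⟨j', h1, h2, h3, h4⟩)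
          · exact Or.inl h
          · refine Or.inr ⟨1, le_refl 1, by simp, ?_, by simpa using h⟩
            rw [hsum 0]
            simp only [List.take_zero, pvCnt, List.countP_nil, Nat.cast_zero, add_zero]
            exact hck
          · refine Or.inr ⟨j' + 1, by omega, by simp; omega, ?_, ?_⟩
            · rw [hsum]; omega
            · rw [List.take_succ_cons]; simpa [List.append_assoc] using h4
        · rintro (h | ⟨j, h1, h2, h3, h4⟩)
          · exact Or.inl (Or.inl h)
          · obtain ⟨j'', rfl⟩ : ∃ j'', j = j'' + 1 := ⟨j - 1, by omega⟩
            rcases Nat.eq_zero_or_pos j'' with hj | hj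
            · subst hj
              exact Or.inl (Or.inr (by simpa using h4))
            · refine Or.inr ⟨j'', hj, by simp at h2; omega, ?_, ?_⟩
              · rw [hsum] at h3; omega
              · rw [List.take_succ_cons] at h4; simpa [List.append_assoc] using h4
      by_cases hmem : (path ++ [x]) ∈ trie
      · rw [if_pos hmem]
        exact key trie res (fun z => ⟨Or.inl, fun h => h.elim id (fun hz => hz ▸ hmem)⟩)
      · rw [if_neg hmem]
        exact key (PySem.Set.add trie (path ++ [x])) (res + 1)
          (fun z => PySem.Set.mem_add trie (path ++ [x]) z)
    · rw [if_neg hck]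
      simp only []
      constructor
      · exact Or.inl
      · rintro (h | ⟨j, h1, h2, h3, h4⟩)
        · exact h
        · exfalso
          obtain ⟨j'', rfl⟩ : ∃ j'', j = j'' + 1 := ⟨j - 1, by omega⟩
          rw [hsum] at h3
          have := pvCnt_nonneg p (rest.take j'')
          omega

lemma pvInnerA_len (k p : Int) (l : List Int) : ∀ (path : List Int) (c : Int)
    (trie : PySem.Set (List Int)) (res : Int), res = (trie.length : Int) → trie.Nodup →
    (pvInnerA k p l path c trie res).2 = ((pvInnerA k p l path c trie res).1.length : Int) ∧
      (pvInnerA k p l path c trie res).1.Nodup := by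
  induction l with
  | nil => intro path c trie res h hn; simpa [pvInnerA] using ⟨h, hn⟩
  | cons x rest ih =>
    intro path c trie res h hn
    simp only [pvInnerA]
    by_cases hck : (if PySem.Int.mod x p == 0 then c + 1 else c) ≤ k
    · rw [if_pos hck]
      by_cases hmem : (path ++ [x]) ∈ trie
      · rw [if_pos hmem]; exact ih _ _ _ _ h hn
      · rw [if_neg hmem]
        apply ih
        · rw [PySem.Set.add_of_not_mem hmem]; simp [h]
        · exact PySem.Set.nodup_add trie (path ++ [x]) hn
    · rw [if_neg hck]; exact ⟨h, hn⟩

lemma pvFoldA (k p : Int) (nums : List Int) : ∀ (ss : List Nat)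
    (st : PySem.Set (List Int) × Int), st.2 = (st.1.length : Int) → st.1.Nodup →
    ((ss.foldl (fun st start => pvInnerA k p (nums.drop start) [] 0 st.1 st.2) st).2
        = (((ss.foldl (fun st start => pvInnerA k p (nums.drop start) [] 0 st.1 st.2) st).1.length : Int))) ∧
      ((ss.foldl (fun st start => pvInnerA k p (nums.drop start) [] 0 st.1 st.2) st).1.Nodup) ∧
      ∀ y, (y ∈ (ss.foldl (fun st start => pvInnerA k p (nums.drop start) [] 0 st.1 st.2) st).1 ↔
        y ∈ st.1 ∨ ∃ s ∈ ss, ∃ j : Nat, 1 ≤ j ∧ j ≤ (nums.drop s).length ∧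
          pvCnt p ((nums.drop s).take j) ≤ k ∧ y = (nums.drop s).take j) := by
  intro ss
  induction ss with
  | nil => intro st h hn; simp [h, hn]
  | cons s ss' ih =>
    intro st h hn
    simp only [List.foldl_cons]
    obtain ⟨h', hn'⟩ := pvInnerA_len k p (nums.drop s) [] 0 st.1 st.2 h hn
    obtain ⟨H1, H2, H3⟩ := ih (pvInnerA k p (nums.drop s) [] 0 st.1 st.2) h' hn'
    refine ⟨H1, H2, fun y => ?_⟩
    rw [H3 y, pvInnerA_mem]
    simp only [List.nil_append, zero_add, List.mem_cons]
    constructor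
    · rintro ((h0 | ⟨j, hj⟩) | ⟨s', hs', hj⟩)
      · exact Or.inl h0
      · exact Or.inr ⟨s, Or.inl rfl, j, hj⟩
      · exact Or.inr ⟨s', Or.inr hs', hj⟩
    · rintro (h0 | ⟨s', (rfl | hs'), hj⟩)
      · exact Or.inl (Or.inl h0)
      · exact Or.inl (Or.inr hj)
      · exact Or.inr ⟨s', hs', hj⟩

lemma pvPre_spec (p : Int) : ∀ (l : List Int) (acc : List Int) (c : Int), acc ≠ [] →
    PySem.List.pyGetD acc (-1) 0 = c →
    l.foldl (fun pre v => pre ++ [PySem.List.pyGetD pre (-1) 0 +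
        (if PySem.Int.mod v p == 0 then 1 else 0)]) acc
      = acc ++ (List.range l.length).map (fun i => c + pvCnt p (l.take (i + 1))) := by
  intro l
  induction l with
  | nil => intro acc c _ _; simp
  | cons x rest ih =>
    intro acc c hne hlast
    simp only [List.foldl_cons]
    rw [hlast]
    rw [ih (acc ++ [c + (if PySem.Int.mod x p == 0 then 1 else 0)])
          (c + (if PySem.Int.mod x p == 0 then 1 else 0))
          (by simp) (PySem.List.pyGetD_neg_one_append_singleton acc _ 0)]
    rw [List.length_cons, List.range_succ_eq_map, List.map_cons, List.map_map,
        List.append_assoc]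
    congr 1
    rw [List.singleton_append]
    congr 1
    · simp [List.take_succ_cons, pvCnt]
    · apply List.map_congr_left
      intro i _
      simp only [Function.comp_apply, Nat.succ_eq_add_one, List.take_succ_cons, pvCnt_cons]
      ring

lemma pvPre_getD (p : Int) (nums : List Int) (i : Int) (h0 : 0 ≤ i) (h1 : i ≤ nums.length) :
    PySem.List.pyGetD (nums.foldl (fun pre v => pre ++ [PySem.List.pyGetD pre (-1) 0 +
        (if PySem.Int.mod v p == 0 then 1 else 0)]) [(0 : Int)]) i 0
      = pvCnt p (nums.take i.toNat) := by
  rw [pvPre_spec p nums [(0 : Int)] 0 (by simp) (by rfl)]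
  have hm : i.toNat ≤ nums.length := by omega
  rw [← Int.toNat_of_nonneg h0, PySem.List.pyGetD_natCast, Int.toNat_natCast]
  simp only [zero_add, List.singleton_append]
  revert hm
  generalize i.toNat = m
  intro hm
  rcases Nat.eq_zero_or_pos m with hz | hpos
  · subst hz; simp [pvCnt]
  · obtain ⟨m', rfl⟩ : ∃ m', m = m' + 1 := ⟨m - 1, by omega⟩
    rw [List.getD_cons_succ]
    rw [List.getD_eq_getElem _ _ (by simpa using (by omega : m' < nums.length))]
    simp

lemma pv_mem_foldl_addIf {α : Type} (l : List α) (P : α → Prop) [DecidablePred P]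
    (g : α → List Int) : ∀ (s0 : PySem.Set (List Int)) (y : List Int),
    (y ∈ l.foldl (fun s e => if P e then PySem.Set.add s (g e) else s) s0 ↔
      y ∈ s0 ∨ ∃ e ∈ l, P e ∧ y = g e) := by
  induction l with
  | nil => intro s0 y; simp
  | cons a t ih =>
    intro s0 y
    simp only [List.foldl_cons, List.mem_cons]
    rw [ih]
    by_cases hp : P a
    · rw [if_pos hp]
      rw [PySem.Set.mem_add]
      constructor
      · rintro ((h | h) | ⟨e, he, hpe, hy⟩)
        · exact Or.inl h
        · exact Or.inr ⟨a, Or.inl rfl, hp, h⟩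
        · exact Or.inr ⟨e, Or.inr he, hpe, hy⟩
      · rintro (h | ⟨e, (rfl | he), hpe, hy⟩)
        · exact Or.inl (Or.inl h)
        · exact Or.inl (Or.inr hy)
        · exact Or.inr ⟨e, he, hpe, hy⟩
    · rw [if_neg hp]
      constructor
      · rintro (h | ⟨e, he, hpe, hy⟩)
        · exact Or.inl h
        · exact Or.inr ⟨e, Or.inr he, hpe, hy⟩
      · rintro (h | ⟨e, (rfl | he), hpe, hy⟩)
        · exact Or.inl h
        · exact absurd hpe hp
        · exact Or.inr ⟨e, he, hpe, hy⟩

lemma pv_nodup_foldl_addIf {α : Type} (l : List α) (P : α → Prop) [DecidablePred P]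
    (g : α → List Int) : ∀ (s0 : PySem.Set (List Int)), s0.Nodup →
    (l.foldl (fun s e => if P e then PySem.Set.add s (g e) else s) s0).Nodup := by
  induction l with
  | nil => intro s0 h; simpa using h
  | cons a t ih =>
    intro s0 h
    simp only [List.foldl_cons]
    apply ih
    by_cases hp : P a
    · rw [if_pos hp]; exact PySem.Set.nodup_add s0 (g a) h
    · rw [if_neg hp]; exact h

lemma pvCnt_append (p : Int) (l₁ l₂ : List Int) :
    pvCnt p (l₁ ++ l₂) = pvCnt p l₁ + pvCnt p l₂ := by
  simp [pvCnt, List.countP_append]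

lemma pvCnt_take_sub (p : Int) (nums : List Int) (s e : Nat) (h : s ≤ e) :
    pvCnt p (nums.take e) - pvCnt p (nums.take s) = pvCnt p ((nums.drop s).take (e - s)) := by
  conv_lhs => rw [show e = s + (e - s) by omega]
  rw [List.take_add, pvCnt_append]
  ring

lemma pvFoldB_mem (nums : List Int) (k : Int) (pre : List Int) (n : Nat) :
    ∀ (ss : List Nat) (s0 : PySem.Set (List Int)) (y : List Int),
    (y ∈ ss.foldl (fun seen (s : Nat) =>
        (PySem.List.pyRange ((s : Int) + 1) ((n : Int) + 1) 1).foldl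
          (fun seen e =>
            if PySem.List.pyGetD pre e 0 - PySem.List.pyGetD pre (s : Int) 0 ≤ k then
              PySem.Set.add seen (PySem.List.slice nums (some (s : Int)) (some e))
            else seen)
          seen) s0 ↔
      y ∈ s0 ∨ ∃ s ∈ ss, ∃ e ∈ PySem.List.pyRange ((s : Int) + 1) ((n : Int) + 1) 1,
        (PySem.List.pyGetD pre e 0 - PySem.List.pyGetD pre (s : Int) 0 ≤ k) ∧
        y = PySem.List.slice nums (some (s : Int)) (some e)) := by
  intro ss
  induction ss with
  | nil => intro s0 y; simp
  | cons s ss' ih =>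
    intro s0 y
    simp only [List.foldl_cons, List.mem_cons]
    rw [ih]
    rw [pv_mem_foldl_addIf (PySem.List.pyRange ((s : Int) + 1) ((n : Int) + 1) 1)
          (fun e => PySem.List.pyGetD pre e 0 - PySem.List.pyGetD pre (s : Int) 0 ≤ k)
          (fun e => PySem.List.slice nums (some (s : Int)) (some e))]
    constructor
    · rintro ((h | ⟨e, he, hc, hy⟩) | ⟨s', hs', hrest⟩)
      · exact Or.inl h
      · exact Or.inr ⟨s, Or.inl rfl, e, he, hc, hy⟩
      · exact Or.inr ⟨s', Or.inr hs', hrest⟩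
    · rintro (h | ⟨s', (rfl | hs'), hrest⟩)
      · exact Or.inl (Or.inl h)
      · exact Or.inl (Or.inr hrest)
      · exact Or.inr ⟨s', hs', hrest⟩

lemma pvFoldB_nodup (nums : List Int) (k : Int) (pre : List Int) (n : Nat) :
    ∀ (ss : List Nat) (s0 : PySem.Set (List Int)), s0.Nodup →
    (ss.foldl (fun seen (s : Nat) =>
        (PySem.List.pyRange ((s : Int) + 1) ((n : Int) + 1) 1).foldl
          (fun seen e =>
            if PySem.List.pyGetD pre e 0 - PySem.List.pyGetD pre (s : Int) 0 ≤ k then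
              PySem.Set.add seen (PySem.List.slice nums (some (s : Int)) (some e))
            else seen)
          seen) s0).Nodup := by
  intro ss
  induction ss with
  | nil => intro s0 h; simpa using h
  | cons s ss' ih =>
    intro s0 h
    simp only [List.foldl_cons]
    apply ih
    exact pv_nodup_foldl_addIf _ _ _ s0 h

lemma pvValid_iff (nums : List Int) (k p : Int) (s : Nat) (hs : s < nums.length) (y : List Int) :
    (∃ e ∈ PySem.List.pyRange ((s : Int) + 1) ((nums.length : Int) + 1) 1,
        (PySem.List.pyGetD (nums.foldl (fun pre v => pre ++ [PySem.List.pyGetD pre (-1) 0 +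
            (if PySem.Int.mod v p == 0 then 1 else 0)]) [(0 : Int)]) e 0
          - PySem.List.pyGetD (nums.foldl (fun pre v => pre ++ [PySem.List.pyGetD pre (-1) 0 +
            (if PySem.Int.mod v p == 0 then 1 else 0)]) [(0 : Int)]) (s : Int) 0 ≤ k) ∧
        y = PySem.List.slice nums (some (s : Int)) (some e))
    ↔ (∃ j : Nat, 1 ≤ j ∧ j ≤ (nums.drop s).length ∧ pvCnt p ((nums.drop s).take j) ≤ k ∧
        y = (nums.drop s).take j) := by
  constructor
  · rintro ⟨e, he, hcond, rfl⟩
    rw [PySem.List.mem_pyRange_one] at he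
    have h0e : 0 ≤ e := by omega
    rw [pvPre_getD p nums e (by omega) (by omega),
        pvPre_getD p nums (s : Int) (by positivity) (by exact_mod_cast le_of_lt hs)] at hcond
    rw [Int.toNat_natCast] at hcond
    refine ⟨e.toNat - s, by omega, by rw [List.length_drop]; omega, ?_, ?_⟩
    · rw [← pvCnt_take_sub p nums s e.toNat (by omega)]
      exact hcond
    · rw [PySem.List.slice_toNat nums (by positivity) h0e]
      rw [Int.toNat_natCast]
  · rintro ⟨j, hj1, hj2, hcond, rfl⟩
    simp only [List.length_drop] at hj2
    refine ⟨((s + j : Nat) : Int), ?_, ?_, ?_⟩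
    · rw [PySem.List.mem_pyRange_one]
      constructor <;> push_cast <;> omega
    · rw [pvPre_getD p nums _ (by positivity) (by push_cast; omega),
          pvPre_getD p nums (s : Int) (by positivity) (by exact_mod_cast le_of_lt hs)]
      rw [Int.toNat_natCast, Int.toNat_natCast]
      rw [pvCnt_take_sub p nums s (s + j) (by omega)]
      simpa using hcond
    · rw [PySem.List.slice_toNat nums (by positivity) (by positivity)]
      rw [Int.toNat_natCast, Int.toNat_natCast]
      congr 1
      omega

-- the two ports agree on every input: A returns the size of its trie, whose node paths are
-- exactly the distinct subarrays with at most k p-divisible elements, the same collection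
-- B accumulates in its set
lemma pvPorts_eq (nums : List Int) (k p : Int) :
    countDistinct2 nums k p = countDistinct2_alt nums k p := by
  unfold countDistinct2 countDistinct2_alt
  simp only []
  obtain ⟨hA1, hA2, hA3⟩ := pvFoldA k p nums (List.range nums.length)
    ((PySem.Set.empty : PySem.Set (List Int)), 0) rfl List.nodup_nil
  rw [hA1]
  have hB2 := pvFoldB_nodup nums k
    (nums.foldl (fun pre v => pre ++ [PySem.List.pyGetD pre (-1) 0 +
      (if PySem.Int.mod v p == 0 then 1 else 0)]) [(0 : Int)]) nums.length
    (List.range nums.length) PySem.Set.empty List.nodup_nil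
  have hperm := (List.perm_ext_iff_of_nodup hA2 hB2).mpr (fun y => by
    rw [hA3 y, pvFoldB_mem nums k _ nums.length (List.range nums.length) PySem.Set.empty y]
    simp only [List.mem_range, PySem.Set.empty, List.not_mem_nil, false_or]
    constructor
    · rintro ⟨s, hs, hj⟩
      exact ⟨s, hs, (pvValid_iff nums k p s hs y).mpr hj⟩
    · rintro ⟨s, hs, he⟩
      exact ⟨s, hs, (pvValid_iff nums k p s hs y).mp he⟩)
  rw [hperm.length_eq]

-- ===== VERDICT (by name: the statement is the Claim_ definition above) =====
theorem countDistinct2_spec : Claim_equal_countDistinct2 := by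
  intro nums k p _ _
  unfold Spec_countDistinct2
  exact pvPorts_eq nums k p
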